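-- pv_equiv track=rewrite | github.com/deng1fan/LazyProjects | general_files/utils/data_util.py | max_lens
-- ===== SOURCE A (Python) =====
-- def max_lens(X):
--     """
--     max_lens
--     """
--     if not isinstance(X[0], list):
--         return [len(X)]
--     elif not isinstance(X[0][0], list):
--         return [len(X), max(len(x) for x in X)]
--     elif not isinstance(X[0][0][0], list):
--         return [len(X), max(len(x) for x in X), max(len(x) for xs in X for x in xs)]
--     else:
--         raise ValueError("Data list whose dim is greater than 3 is not supported!")
-- ===== SOURCE B (Python) =====
-- def max_lens(X):
--     """
--     max_lens
--     """
--     out = []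
--     level = [X]
--     node = X
--     while True:
--         out.append(max(len(s) for s in level))
--         if not isinstance(node[0], list):
--             return out
--         if len(out) == 3:
--             raise ValueError("Data list whose dim is greater than 3 is not supported!")
--         level = [s for seq in level for s in seq]
--         node = node[0]
-- ===== Notes on version B (the rewrite author's own statement) =====
-- stated objective: alternative
-- what changed: Replaces the three-way isinstance/return branch chain with a single while loop that keeps a flattened current-level list (starting as [X]), appends the max length over that level each iteration, and descends a first-element pointer to decide the depth.
import Mathlib
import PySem

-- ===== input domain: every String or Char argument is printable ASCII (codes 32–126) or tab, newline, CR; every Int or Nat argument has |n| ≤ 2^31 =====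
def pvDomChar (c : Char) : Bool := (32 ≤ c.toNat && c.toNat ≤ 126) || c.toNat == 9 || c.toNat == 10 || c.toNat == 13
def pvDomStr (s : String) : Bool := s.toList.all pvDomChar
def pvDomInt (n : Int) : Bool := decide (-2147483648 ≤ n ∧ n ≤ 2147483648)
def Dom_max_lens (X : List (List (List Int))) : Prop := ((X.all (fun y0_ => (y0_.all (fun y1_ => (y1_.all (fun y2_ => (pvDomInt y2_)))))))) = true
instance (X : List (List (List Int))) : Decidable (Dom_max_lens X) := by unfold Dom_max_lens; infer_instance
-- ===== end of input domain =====

-- B replaces A's three-way isinstance branch chain by one level-flattening loop (unrolled here by level type); objective: alternative decomposition, same cost.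


-- ===== PORT A =====
-- At the List (List (List Int)) type, isinstance(X[0], list) and isinstance(X[0][0], list) are
-- True and isinstance(X[0][0][0], list) is False, so A takes its third branch; the X[0], X[0][0],
-- X[0][0][0] index accesses and the max(...) over nonempty generators are guaranteed by Pre_.
-- max over an empty list (unreachable under Pre_) is rendered as .getD 0.
def max_lens (X : List (List (List Int))) : List Int :=
  ((X.length : Int)) ::
  ((PySem.List.max? (X.map (fun x => (x.length : Int))) (fun y => y)).getD 0) ::
  [((PySem.List.max? ((X.flatMap (fun xs => xs)).map (fun x => (x.length : Int))) (fun y => y)).getD 0)]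

-- ===== PORT B =====
-- max(len(s) for s in level); the empty-level case (unreachable under Pre_) is rendered as .getD 0.
def pyMaxLen {α : Type} (level : List (List α)) : Int :=
  (PySem.List.max? (level.map (fun s => (s.length : Int))) (fun y => y)).getD 0

-- B's while loop: the level list changes element type each time it is flattened, so each
-- iteration is transcribed at its own type; the node = X, X[0], X[0][0] pointer's
-- isinstance(node[0], list) tests are True, True, False at this type, so the loop runs
-- exactly three iterations and returns (the ValueError branch is never reached).
def max_lens_alt (X : List (List (List Int))) : List Int :=
  let level0 : List (List (List (List Int))) := [X]
  let out1 := [pyMaxLen level0]                 -- iteration 1; node[0] = X[0] is a list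
  let level1 := level0.flatten
  let out2 := out1 ++ [pyMaxLen level1]         -- iteration 2; node[0] = X[0][0] is a list
  let level2 := level1.flatten
  let out3 := out2 ++ [pyMaxLen level2]         -- iteration 3; node[0] = X[0][0][0] is an int
  out3

-- ===== PRECONDITION & SPEC =====
-- Pre_ excludes exactly the inputs where the Python A raises IndexError: X[0], X[0][0] or
-- X[0][0][0] missing (X, its first row, or that row's first inner list empty).
def Pre_max_lens (X : List (List (List Int))) : Prop :=
  X ≠ [] ∧ X.headI ≠ [] ∧ X.headI.headI ≠ []
instance (X : List (List (List Int))) : Decidable (Pre_max_lens X) := by unfold Pre_max_lens; infer_instance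
def pvWitness_max_lens : List (List (List Int)) := [[[1]]]

def Spec_max_lens (X : List (List (List Int))) (out : List Int) : Prop := out = max_lens_alt X
instance (X : List (List (List Int))) (out : List Int) : Decidable (Spec_max_lens X out) := by unfold Spec_max_lens; infer_instance

-- ===== CLAIM (what is proved, stated in full; the proofs are below) =====
def Claim_equal_max_lens : Prop := ∀ (X : List (List (List Int))), Dom_max_lens X → Pre_max_lens X → Spec_max_lens X (max_lens X)

-- ===== LEMMAS AND PROOFS =====

-- ===== VERDICT (by name: the statement is the Claim_ definition above) =====
theorem max_lens_spec : Claim_equal_max_lens := by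
  intro X _ _
  unfold Spec_max_lens max_lens max_lens_alt pyMaxLen
  simp [List.flatMap_def, PySem.List.max?_id_cons]
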